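-- pv_equiv track=rewrite | github.com/malinatrash/Algorithm-and-DataStructures | problems/Contests/tinkoff_spring_2023/A/A.py | solve
-- ===== SOURCE A (Python) =====
-- def solve(m) -> int:
--     max5 = -1
--     for i in range(len(m) - 6):
--         cur_list = m[i:i+7]
--         if 3 not in cur_list and 2 not in cur_list:
--             cur_max = 0
--             for z in cur_list:
--                 if z == 5:
--                     cur_max += 1
--             max5 = max(max5, cur_max)
--     return max5
-- ===== SOURCE B (Python) =====
-- def solve(m) -> int:
--     n = len(m)
--     if n < 7:
--         return -1
--     w = m[0:7]
--     c2 = sum(1 for x in w if x == 2)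
--     c3 = sum(1 for x in w if x == 3)
--     c5 = sum(1 for x in w if x == 5)
--     best = c5 if c2 == 0 and c3 == 0 else -1
--     for i in range(7, n):
--         out, inn = m[i - 7], m[i]
--         c2 = c2 + (1 if inn == 2 else 0) - (1 if out == 2 else 0)
--         c3 = c3 + (1 if inn == 3 else 0) - (1 if out == 3 else 0)
--         c5 = c5 + (1 if inn == 5 else 0) - (1 if out == 5 else 0)
--         if c2 == 0 and c3 == 0:
--             best = max(best, c5)
--     return best
-- ===== Notes on version B (the rewrite author's own statement) =====
-- stated objective: faster
-- what changed: Replace the re-slice-and-rescan of every 7-element window with a single sliding-window pass maintaining counts of 2s, 3s and 5s that are updated incrementally as the window moves.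
import Mathlib
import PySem

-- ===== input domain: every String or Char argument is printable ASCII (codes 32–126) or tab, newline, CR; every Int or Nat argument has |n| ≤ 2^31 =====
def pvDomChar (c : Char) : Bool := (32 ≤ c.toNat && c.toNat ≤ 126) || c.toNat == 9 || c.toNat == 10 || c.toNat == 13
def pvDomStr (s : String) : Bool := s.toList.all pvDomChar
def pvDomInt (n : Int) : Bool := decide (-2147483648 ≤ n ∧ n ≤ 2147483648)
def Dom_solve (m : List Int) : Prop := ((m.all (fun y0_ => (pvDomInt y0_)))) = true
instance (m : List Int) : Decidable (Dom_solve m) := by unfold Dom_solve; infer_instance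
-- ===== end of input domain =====

-- B replaces A's per-window re-slice and re-scan by one sliding-window pass with
-- incrementally maintained counts of 2s/3s/5s (objective: faster, constant-factor).


-- ===== PORT A =====
def solve (m : List Int) : Int :=
  (PySem.List.pyRange 0 ((m.length : Int) - 6) 1).foldl
    (fun max5 i =>
      let cur_list := PySem.List.slice m (some i) (some (i + 7))
      if ¬ (3 ∈ cur_list) ∧ ¬ (2 ∈ cur_list) then
        let cur_max := cur_list.foldl (fun a z => if z = 5 then a + 1 else a) (0 : Int)
        max max5 cur_max
      else max5)
    (-1)

-- ===== PORT B =====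
-- loop body of Source B (index accesses m[i-7], m[i] are always in range, so pyGetD is exact)
def solveAltStep (m : List Int) (s : Int × Int × Int × Int) (i : Int) : Int × Int × Int × Int :=
  let out := PySem.List.pyGetD m (i - 7) 0
  let inn := PySem.List.pyGetD m i 0
  let c2 := s.1 + (if inn = 2 then 1 else 0) - (if out = 2 then 1 else 0)
  let c3 := s.2.1 + (if inn = 3 then 1 else 0) - (if out = 3 then 1 else 0)
  let c5 := s.2.2.1 + (if inn = 5 then 1 else 0) - (if out = 5 then 1 else 0)
  let best := if c2 = 0 ∧ c3 = 0 then max s.2.2.2 c5 else s.2.2.2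
  (c2, c3, c5, best)

def solve_alt (m : List Int) : Int :=
  let n := m.length
  if n < 7 then -1
  else
    let w := PySem.List.slice m (some 0) (some 7)
    let c2 := w.foldl (fun a x => if x = 2 then a + 1 else a) (0 : Int)
    let c3 := w.foldl (fun a x => if x = 3 then a + 1 else a) (0 : Int)
    let c5 := w.foldl (fun a x => if x = 5 then a + 1 else a) (0 : Int)
    let best : Int := if c2 = 0 ∧ c3 = 0 then c5 else -1
    let r := (PySem.List.pyRange 7 (n : Int) 1).foldl (solveAltStep m) (c2, c3, c5, best)
    r.2.2.2

-- ===== PRECONDITION & SPEC =====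
def Spec_solve (m : List Int) (out : Int) : Prop := out = solve_alt m
instance (m : List Int) (out : Int) : Decidable (Spec_solve m out) := by unfold Spec_solve; infer_instance

-- ===== CLAIM (what is proved, stated in full; the proofs are below) =====
def Claim_equal_solve : Prop := ∀ (m : List Int), Dom_solve m → Spec_solve m (solve m)

-- ===== LEMMAS AND PROOFS =====

-- the window of length 7 starting at j, and the count of v in it (as Int)
def win (m : List Int) (j : Nat) : List Int := (m.drop j).take 7
def cnt (m : List Int) (v : Int) (j : Nat) : Int := ((win m j).count v : Int)

-- A's running maximum after processing window starts 0 .. t-1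
def Aspec (m : List Int) : Nat → Int
  | 0 => -1
  | t + 1 =>
      if cnt m 2 t = 0 ∧ cnt m 3 t = 0 then max (Aspec m t) (cnt m 5 t) else Aspec m t

theorem cnt_nonneg (m : List Int) (v : Int) (j : Nat) : 0 ≤ cnt m v j := by
  simp [cnt]

theorem inner_count (l : List Int) (v : Int) :
    l.foldl (fun a z => if z = v then a + 1 else a) (0 : Int) = (l.count v : Int) := by
  have := PySem.List.foldl_ite_add_one (l := l) (p := fun z => z = v) (a := (0 : Int))
  simpa [List.count] using this

theorem solve_eq_Aspec (m : List Int) (t : Nat) :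
    (PySem.List.pyRange 0 (t : Int) 1).foldl
      (fun max5 i =>
        let cur_list := PySem.List.slice m (some i) (some (i + 7))
        if ¬ (3 ∈ cur_list) ∧ ¬ (2 ∈ cur_list) then
          let cur_max := cur_list.foldl (fun a z => if z = 5 then a + 1 else a) (0 : Int)
          max max5 cur_max
        else max5)
      (-1) = Aspec m t := by
  induction t with
  | zero => simp [PySem.List.pyRange_one_eq_nil, Aspec]
  | succ t ih =>
      have h : ((t : Int) + 1) = ((t + 1 : Nat) : Int) := by push_cast; ring
      rw [← h, PySem.List.pyRange_one_succ_right (by positivity), List.foldl_append, ih]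
      have hsl : PySem.List.slice m (some (t : Int)) (some ((t : Int) + 7)) = win m t := by
        have := PySem.List.slice_natCast_add (xs := m) (j := t) (n := 7)
        simpa [win] using this
      simp only [List.foldl, hsl, Aspec, inner_count]
      have h3 : (3 ∉ win m t) ↔ cnt m 3 t = 0 := by
        simp [cnt, List.count_eq_zero]
      have h2 : (2 ∉ win m t) ↔ cnt m 2 t = 0 := by
        simp [cnt, List.count_eq_zero]
      have hiff : (3 ∉ win m t ∧ 2 ∉ win m t) ↔ (cnt m 2 t = 0 ∧ cnt m 3 t = 0) := by
        rw [h3, h2]; tauto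
      rw [show ((win m t).count 5 : Int) = cnt m 5 t from rfl, if_congr hiff rfl rfl]

-- sliding-window recurrence for the counts
theorem cnt_slide (m : List Int) (v : Int) (t : Nat) (h : t + 8 ≤ m.length) :
    cnt m v (t + 1) =
      cnt m v t - (if m[t]'(by omega) = v then 1 else 0)
        + (if m[t + 7]'(by omega) = v then 1 else 0) := by
  have hdrop : m.drop t = m[t]'(by omega) :: m.drop (t + 1) :=
    List.drop_eq_getElem_cons (by omega)
  have hlen : 6 < (m.drop (t + 1)).length := by
    simp [List.length_drop]; omega
  have htake : (m.drop (t + 1)).take 7 =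
      (m.drop (t + 1)).take 6 ++ [(m.drop (t + 1))[6]'hlen] := by
    rw [List.take_add_one]
    simp [List.getElem?_eq_getElem hlen]
  have hget : (m.drop (t + 1))[6]'hlen = m[t + 7]'(by omega) := by
    rw [List.getElem_drop]
  have hwt : win m t = m[t]'(by omega) :: (m.drop (t + 1)).take 6 := by
    rw [win, hdrop]
    rfl
  have hwt1 : win m (t + 1) = (m.drop (t + 1)).take 6 ++ [m[t + 7]'(by omega)] := by
    rw [win, htake, hget]
  rw [cnt, cnt, hwt, hwt1]
  by_cases h1 : m[t]'(by omega) = v <;> by_cases h2 : m[t + 7]'(by omega) = v <;>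
    simp [List.count_append, h1, h2]

-- B's loop invariant: after t iterations the state is the three counts of window t
-- together with A's running maximum over starts 0 .. t
theorem loop_invariant (m : List Int) (t : Nat) (h : 7 + t ≤ m.length) :
    (PySem.List.pyRange 7 ((7 + t : Nat) : Int) 1).foldl (solveAltStep m)
      (cnt m 2 0, cnt m 3 0, cnt m 5 0, Aspec m 1) =
    (cnt m 2 t, cnt m 3 t, cnt m 5 t, Aspec m (t + 1)) := by
  induction t with
  | zero => simp [PySem.List.pyRange_one_eq_nil]
  | succ t ih =>
      have hc : ((7 + (t + 1) : Nat) : Int) = ((7 + t : Nat) : Int) + 1 := by push_cast; ring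
      rw [hc, PySem.List.pyRange_one_succ_right (by push_cast; omega), List.foldl_append,
        ih (by omega)]
      have hlt : t < m.length := by omega
      have hlt7 : t + 7 < m.length := by omega
      have hout : PySem.List.pyGetD m (((7 + t : Nat) : Int) - 7) 0 = m[t]'hlt := by
        have : ((7 + t : Nat) : Int) - 7 = ((t : Nat) : Int) := by push_cast; ring
        rw [this, PySem.List.pyGetD_natCast, List.getD_eq_getElem?_getD,
          List.getElem?_eq_getElem hlt, Option.getD_some]
      have hinn : PySem.List.pyGetD m ((7 + t : Nat) : Int) 0 = m[t + 7]'hlt7 := by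
        have h7 : ((7 + t : Nat) : Int) = (((t + 7 : Nat) : Nat) : Int) := by push_cast; ring
        rw [h7, PySem.List.pyGetD_natCast, List.getD_eq_getElem?_getD,
          List.getElem?_eq_getElem hlt7, Option.getD_some]
      have hs2 := cnt_slide m 2 t (by omega)
      have hs3 := cnt_slide m 3 t (by omega)
      have hs5 := cnt_slide m 5 t (by omega)
      simp only [List.foldl, solveAltStep, hout, hinn]
      have e2 : cnt m 2 t + (if m[t + 7]'hlt7 = 2 then (1:Int) else 0)
          - (if m[t]'hlt = 2 then (1:Int) else 0) = cnt m 2 (t + 1) := by rw [hs2]; ring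
      have e3 : cnt m 3 t + (if m[t + 7]'hlt7 = 3 then (1:Int) else 0)
          - (if m[t]'hlt = 3 then (1:Int) else 0) = cnt m 3 (t + 1) := by rw [hs3]; ring
      have e5 : cnt m 5 t + (if m[t + 7]'hlt7 = 5 then (1:Int) else 0)
          - (if m[t]'hlt = 5 then (1:Int) else 0) = cnt m 5 (t + 1) := by rw [hs5]; ring
      simp only [e2, e3, e5]
      rfl

theorem init_counts (m : List Int) (v : Int) :
    (PySem.List.slice m (some 0) (some 7)).foldl
      (fun a x => if x = v then a + 1 else a) (0 : Int) = cnt m v 0 := by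
  have h7 : PySem.List.slice m (some 0) (some 7) = win m 0 := by
    have := PySem.List.slice_natCast_add (xs := m) (j := 0) (n := 7)
    simpa [win] using this
  rw [h7, inner_count, cnt]

theorem init_best (m : List Int) :
    (if cnt m 2 0 = 0 ∧ cnt m 3 0 = 0 then cnt m 5 0 else (-1 : Int)) = Aspec m 1 := by
  have h5 := cnt_nonneg m 5 0
  simp only [Aspec]
  split_ifs with hc
  · rw [max_eq_right (by omega)]
  · rfl

-- ===== VERDICT (by name: the statement is the Claim_ definition above) =====
theorem solve_spec : Claim_equal_solve := by
  intro m _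
  unfold Spec_solve solve solve_alt
  by_cases h : m.length < 7
  · have hnil : ((m.length : Int) - 6) ≤ 0 := by omega
    rw [PySem.List.pyRange_one_eq_nil hnil]
    simp [h]
  · have hN : ((m.length : Int) - 6) = ((m.length - 6 : Nat) : Int) := by omega
    rw [hN, solve_eq_Aspec]
    have hsimp : ¬ m.length < 7 := by omega
    simp only [hsimp, if_false, init_counts, init_best]
    have hn : (m.length : Int) = ((7 + (m.length - 7) : Nat) : Int) := by omega
    rw [hn, loop_invariant m (m.length - 7) (by omega)]
    have : m.length - 7 + 1 = m.length - 6 := by omega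
    rw [this]
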